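-- pv_equiv track=rewrite | github.com/fedemotta/subseek | core/subseek_model.py | split_every_n
-- ===== SOURCE A (Python) =====
-- def split_every_n(n, text):
--     """
--     Split the text in n pieces
--     """
--     wordssplit = []
--     auxwords = []
--     words = text.split()
--     count = 0
--     for word in words:
--         if count == n - 1:
--             auxwords.append(word)
--             wordssplit.append(' '.join(auxwords))
--             # reset
--             auxwords = []
--             count = 0
--         else:
--             auxwords.append(word)
--             count = count + 1
--     return wordssplit
-- ===== SOURCE B (Python) =====
-- def split_every_n(n, text):
--     """
--     Split the text in n pieces
--     """
--     words = text.split()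
--     if n <= 0:
--         return []
--     out = []
--     while len(words) >= n:
--         out.append(' '.join(words[:n]))
--         words = words[n:]
--     return out
-- ===== Notes on version B (the rewrite author's own statement) =====
-- stated objective: simpler
-- what changed: B slices whole n-word chunks off the word list in a while loop instead of accumulating words one by one with a counter and an auxiliary buffer; n <= 0 yields [] directly.
import Mathlib
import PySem

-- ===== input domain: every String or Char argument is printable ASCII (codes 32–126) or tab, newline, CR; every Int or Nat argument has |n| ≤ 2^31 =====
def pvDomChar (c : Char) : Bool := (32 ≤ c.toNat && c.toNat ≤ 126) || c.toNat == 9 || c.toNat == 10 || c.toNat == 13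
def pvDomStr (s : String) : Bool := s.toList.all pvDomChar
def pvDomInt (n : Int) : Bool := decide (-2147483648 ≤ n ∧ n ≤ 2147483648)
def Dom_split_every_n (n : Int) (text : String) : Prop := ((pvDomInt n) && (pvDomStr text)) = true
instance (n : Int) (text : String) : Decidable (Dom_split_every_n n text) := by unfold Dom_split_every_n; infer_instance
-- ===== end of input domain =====

-- B splits the text into whole n-word chunks by slicing the word list, instead of
-- A's word-by-word accumulation with a counter and auxiliary buffer (objective: simpler).

-- ===== PORT A =====
-- state: (wordssplit, auxwords, count)
def split_every_n (n : Int) (text : String) : List String :=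
  let words := PySem.Str.split₀ text
  let final := words.foldl
    (fun (st : List String × List String × Int) (word : String) =>
      if st.2.2 = n - 1 then
        (st.1 ++ [PySem.Str.join " " (st.2.1 ++ [word])], [], 0)
      else
        (st.1, st.2.1 ++ [word], st.2.2 + 1))
    ([], [], 0)
  final.1

-- ===== PORT B =====
-- the while loop of Source B: peel off n words at a time while at least n remain
def altLoop (n : Nat) (words : List String) (out : List String) : List String :=
  if _h : 0 < n ∧ n ≤ words.length then
    altLoop n (words.drop n) (out ++ [PySem.Str.join " " (words.take n)])
  else out
termination_by words.length
decreasing_by simp [List.length_drop]; omega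

def split_every_n_alt (n : Int) (text : String) : List String :=
  let words := PySem.Str.split₀ text
  if n ≤ 0 then [] else altLoop n.toNat words []

-- ===== PRECONDITION & SPEC =====
def Spec_split_every_n (n : Int) (text : String) (out : List String) : Prop := out = split_every_n_alt n text
instance (n : Int) (text : String) (out : List String) : Decidable (Spec_split_every_n n text out) := by unfold Spec_split_every_n; infer_instance

-- ===== CLAIM (what is proved, stated in full; the proofs are below) =====
def Claim_equal_split_every_n : Prop := ∀ (n : Int) (text : String), Dom_split_every_n n text → Spec_split_every_n n text (split_every_n n text)

-- ===== LEMMAS AND PROOFS =====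

-- A's loop, rephrased with the pending buffer as the only state (proof device)
def gAux (n : Int) (aux : List String) : List String → List String
  | [] => []
  | w :: ws =>
    if (aux.length : Int) = n - 1 then
      PySem.Str.join " " (aux ++ [w]) :: gAux n [] ws
    else gAux n (aux ++ [w]) ws

theorem foldA_eq_gAux (n : Int) (ws : List String) :
    ∀ (acc aux : List String),
      (ws.foldl (fun (st : List String × List String × Int) (word : String) =>
        if st.2.2 = n - 1 then
          (st.1 ++ [PySem.Str.join " " (st.2.1 ++ [word])], [], 0)
        else
          (st.1, st.2.1 ++ [word], st.2.2 + 1))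
        (acc, aux, (aux.length : Int))).1 = acc ++ gAux n aux ws := by
  induction ws with
  | nil => intro acc aux; simp [gAux]
  | cons w ws ih =>
    intro acc aux
    by_cases h : (aux.length : Int) = n - 1
    · have : (([] : List String).length : Int) = (0 : Int) := by simp
      simpa [List.foldl_cons, h, gAux, List.append_assoc] using
        ih (acc ++ [PySem.Str.join " " (aux ++ [w])]) []
    · have hlen : ((aux ++ [w]).length : Int) = (aux.length : Int) + 1 := by
        simp
      have := ih acc (aux ++ [w])
      rw [hlen] at this
      simpa [List.foldl_cons, h, gAux] using this

theorem gAux_of_nonpos (n : Int) (hn : n ≤ 0) :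
    ∀ (ws aux : List String), gAux n aux ws = [] := by
  intro ws
  induction ws with
  | nil => intro aux; simp [gAux]
  | cons w ws ih =>
    intro aux
    have h : ¬ ((aux.length : Int) = n - 1) := by
      have : (0 : Int) ≤ (aux.length : Int) := by positivity
      omega
    simp [gAux, h, ih]

theorem altLoop_append (n : Nat) : ∀ (k : Nat) (ws : List String), ws.length = k →
    ∀ (out : List String), altLoop n ws out = out ++ altLoop n ws [] := by
  intro k
  induction k using Nat.strong_induction_on with
  | _ k ih =>
    intro ws hk out
    by_cases h : 0 < n ∧ n ≤ ws.length
    · rw [altLoop, dif_pos h]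
      conv_rhs => rw [altLoop, dif_pos h]
      rw [ih (ws.drop n).length (by simp; omega) _ rfl (out ++ [PySem.Str.join " " (ws.take n)]),
          ih (ws.drop n).length (by simp; omega) _ rfl ([] ++ [PySem.Str.join " " (ws.take n)])]
      simp [List.append_assoc]
    · rw [altLoop, dif_neg h, altLoop, dif_neg h]; simp

theorem gAux_eq_altLoop (n : Int) (hn : 1 ≤ n) :
    ∀ (ws aux : List String), aux.length < n.toNat →
      gAux n aux ws = altLoop n.toNat (aux ++ ws) [] := by
  intro ws
  induction ws with
  | nil =>
    intro aux hlt
    have hne : ¬ (0 < n.toNat ∧ n.toNat ≤ (aux ++ ([] : List String)).length) := by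
      simp; omega
    rw [altLoop, dif_neg hne]; simp [gAux]
  | cons w ws ih =>
    intro aux hlt
    by_cases h : (aux.length : Int) = n - 1
    · have hlen : (aux ++ [w]).length = n.toNat := by
        have h' : aux.length = n.toNat - 1 := by omega
        simp [h']; omega
      have hcond : 0 < n.toNat ∧ n.toNat ≤ (aux ++ w :: ws).length := by
        have hL : (aux ++ w :: ws).length = aux.length + (ws.length + 1) := by simp
        constructor
        · omega
        · rw [hL]; omega
      rw [altLoop, dif_pos hcond]
      have hsplit : aux ++ w :: ws = (aux ++ [w]) ++ ws := by simp
      have htake : (aux ++ w :: ws).take n.toNat = aux ++ [w] := by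
        rw [hsplit, ← hlen, List.take_left]
      have hdrop : (aux ++ w :: ws).drop n.toNat = ws := by
        rw [hsplit, ← hlen, List.drop_left]
      rw [htake, hdrop, altLoop_append n.toNat ws.length ws rfl]
      have hih := ih [] (by simp; omega)
      simp only [List.nil_append] at hih
      simp [gAux, h, hih]
    · have hlt' : (aux ++ [w]).length < n.toNat := by
        have h0 : (0 : Int) ≤ (aux.length : Int) := by positivity
        simp; omega
      have hih := ih (aux ++ [w]) hlt'
      simp only [List.append_assoc, List.cons_append, List.nil_append] at hih
      simp [gAux, h, hih]

-- ===== VERDICT (by name: the statement is the Claim_ definition above) =====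
theorem split_every_n_spec : Claim_equal_split_every_n := by
  intro n text _
  unfold Spec_split_every_n split_every_n split_every_n_alt
  simp only []
  have hfold := foldA_eq_gAux n (PySem.Str.split₀ text) [] []
  simp only [List.length_nil, List.nil_append, Nat.cast_zero] at hfold
  rw [hfold]
  by_cases hn : n ≤ 0
  · simp [hn, gAux_of_nonpos n hn]
  · have h1 : 1 ≤ n := by omega
    have := gAux_eq_altLoop n h1 (PySem.Str.split₀ text) [] (by simp; omega)
    simp only [List.nil_append] at this
    simp [hn, this]
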